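-- pv_equiv track=rewrite | github.com/clefever/aoc2019 | day08.py | parse_image_layers
-- ===== SOURCE A (Python) =====
-- def parse_image_layers(data, width, height):
--     """
--     >>> parse_image_layers("123456789012", 3, 2)
--     [[[1, 2, 3], [4, 5, 6]], [[7, 8, 9], [0, 1, 2]]]
--     """
--     num_layers = len(data) // (width*height)
--     image = [[] for _ in range(num_layers)]
--     counter = 0
--     for layer in range(num_layers):
--         for y in range(height):
--             image[layer].append([])
--             for _ in range(width):
--                 image[layer][y].append(int(data[counter]))
--                 counter += 1
--     return image
-- ===== SOURCE B (Python) =====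
-- def parse_image_layers(data, width, height):
--     size = width * height
--     num_layers = len(data) // size
--     return [
--         [[int(c) for c in data[l * size + y * width : l * size + (y + 1) * width]]
--          for y in range(height)]
--         for l in range(num_layers)
--     ]
-- ===== Notes on version B (the rewrite author's own statement) =====
-- stated objective: alternative
-- what changed: A walks one global character counter through three nested index-mutating loops; B computes layer/row boundaries arithmetically and builds the image by slicing the string into layer- and row-substrings with a nested comprehension.
import Mathlib
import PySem

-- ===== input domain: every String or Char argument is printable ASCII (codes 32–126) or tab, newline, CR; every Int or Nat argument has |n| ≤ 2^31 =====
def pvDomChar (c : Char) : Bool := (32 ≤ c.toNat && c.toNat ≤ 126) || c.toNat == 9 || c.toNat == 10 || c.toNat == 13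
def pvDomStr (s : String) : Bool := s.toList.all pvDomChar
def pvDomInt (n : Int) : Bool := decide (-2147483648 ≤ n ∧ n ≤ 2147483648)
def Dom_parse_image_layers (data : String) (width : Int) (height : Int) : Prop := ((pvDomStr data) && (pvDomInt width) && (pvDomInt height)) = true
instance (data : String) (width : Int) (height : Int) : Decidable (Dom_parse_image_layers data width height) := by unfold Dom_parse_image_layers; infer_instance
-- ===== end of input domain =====

-- B replaces A's triple nested loop with a single running character counter by direct
-- slicing: layer/row boundaries are computed arithmetically and each row is one slice
-- (objective: alternative decomposition, same asymptotic cost).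

-- shared helper: int(s) for the one-character string s; the default 0 is never reached
-- under Pre_ (every consumed character is a digit, so int() does not raise)
def pvDigit (c : Char) : Int := (PySem.Int.ofChars? [c]).getD 0

-- ===== PORT A =====
-- 'for _ in range(width): image[layer][y].append(int(data[counter])); counter += 1'
-- (range(width) runs width.toNat times; data[counter] is pyGet?, whose default is never
-- reached under Pre_: the counter stays inside the first num_layers*size characters)
def pvA_rowLoop (cs : List Char) (fuel : Nat) (row : List Int) (counter : Int) :
    List Int × Int :=
  match fuel with
  | 0 => (row, counter)
  | k+1 => pvA_rowLoop cs k (row ++ [pvDigit ((PySem.List.pyGet? cs counter).getD ' ')]) (counter + 1)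

-- 'for y in range(height): image[layer].append([]); …'
def pvA_layerLoop (cs : List Char) (width : Int) (fuel : Nat) (layer : List (List Int))
    (counter : Int) : List (List Int) × Int :=
  match fuel with
  | 0 => (layer, counter)
  | k+1 =>
    let r := pvA_rowLoop cs width.toNat [] counter
    pvA_layerLoop cs width k (layer ++ [r.1]) r.2

-- 'for layer in range(num_layers): …'; each image[layer] is written exactly once, in
-- order, so the pre-initialised empty layers + index mutation equal building by appending
def pvA_imageLoop (cs : List Char) (width height : Int) (fuel : Nat)
    (image : List (List (List Int))) (counter : Int) : List (List (List Int)) × Int :=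
  match fuel with
  | 0 => (image, counter)
  | k+1 =>
    let l := pvA_layerLoop cs width height.toNat [] counter
    pvA_imageLoop cs width height k (image ++ [l.1]) l.2

def parse_image_layers (data : String) (width : Int) (height : Int) :
    List (List (List Int)) :=
  let num_layers := PySem.Int.floordiv (PySem.Str.len data) (width * height)
  (pvA_imageLoop data.toList width height num_layers.toNat [] 0).1

-- ===== PORT B =====
def parse_image_layers_alt (data : String) (width : Int) (height : Int) :
    List (List (List Int)) :=
  let cs := data.toList
  let size := width * height
  let num_layers := PySem.Int.floordiv (PySem.Str.len data) size
  (PySem.List.pyRange 0 num_layers 1).map (fun l =>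
    (PySem.List.pyRange 0 height 1).map (fun y =>
      (PySem.List.slice cs (some (l * size + y * width))
        (some (l * size + (y + 1) * width))).map pvDigit))

-- ===== PRECONDITION & SPEC =====
-- Pre_ excludes exactly the inputs where Python A raises: width*height = 0
-- (ZeroDivisionError), and a non-digit character among the consumed prefix — the first
-- num_layers*size characters, consumed only when width > 0 and height > 0 (ValueError).
def Pre_parse_image_layers (data : String) (width : Int) (height : Int) : Prop :=
  width * height ≠ 0 ∧
  (0 < width → 0 < height →
    (data.toList.take ((PySem.Int.floordiv (PySem.Str.len data) (width * height)) * (width * height)).toNat).all Char.isDigit = true)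

instance (data : String) (width : Int) (height : Int) :
    Decidable (Pre_parse_image_layers data width height) := by
  unfold Pre_parse_image_layers; infer_instance

def pvWitness_parse_image_layers : String × Int × Int := ("123456789012", 3, 2)

def Spec_parse_image_layers (data : String) (width : Int) (height : Int)
    (out : List (List (List Int))) : Prop := out = parse_image_layers_alt data width height

instance (data : String) (width : Int) (height : Int) (out : List (List (List Int))) :
    Decidable (Spec_parse_image_layers data width height out) := by
  unfold Spec_parse_image_layers; infer_instance

-- ===== CLAIM (what is proved, stated in full; the proofs are below) =====
def Claim_equal_parse_image_layers : Prop := ∀ (data : String) (width : Int) (height : Int), Dom_parse_image_layers data width height → Pre_parse_image_layers data width height → Spec_parse_image_layers data width height (parse_image_layers data width height)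

-- ===== LEMMAS AND PROOFS =====
-- loop characterisations of A's port: each loop, run from a nonnegative in-range
-- counter, appends the digit-mapped block of characters it consumes
theorem pv_row (cs : List Char) : ∀ (m : Nat) (acc : List Int) (c : Int), 0 ≤ c →
    c.toNat + m ≤ cs.length →
    pvA_rowLoop cs m acc c = (acc ++ ((cs.drop c.toNat).take m).map pvDigit, c + m) := by
  intro m
  induction m with
  | zero => intro acc c hc _; simp [pvA_rowLoop]
  | succ k ih =>
    intro acc c hc hlen
    have hlt : c.toNat < cs.length := by omega
    have hget : PySem.List.pyGet? cs c = some cs[c.toNat] :=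
      PySem.List.pyGet?_eq_some_getElem cs hc (by omega)
    have hdrop : cs.drop c.toNat = cs[c.toNat] :: cs.drop (c.toNat + 1) :=
      (List.drop_eq_getElem_cons hlt)
    rw [pvA_rowLoop, ih _ (c+1) (by omega) (by omega)]
    have hcn : (c+1).toNat = c.toNat + 1 := by omega
    rw [Prod.ext_iff]
    refine ⟨?_, by push_cast; omega⟩
    rw [hget, hcn]
    simp only [Option.getD_some]
    rw [hdrop, List.take_succ_cons, List.map_cons, List.append_assoc]
    rfl

theorem pv_layer (cs : List Char) (w : Int) (hw : 0 < w) :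
    ∀ (m : Nat) (acc : List (List Int)) (c : Int), 0 ≤ c →
    c.toNat + m * w.toNat ≤ cs.length →
    pvA_layerLoop cs w m acc c =
      (acc ++ (List.range m).map
        (fun y => ((cs.drop (c.toNat + y * w.toNat)).take w.toNat).map pvDigit),
       c + m * w.toNat) := by
  intro m
  induction m with
  | zero => intro acc c hc _; simp [pvA_layerLoop]
  | succ k ih =>
    intro acc c hc hlen
    have hwn : 0 < w.toNat := by omega
    have hsum : (k+1) * w.toNat = w.toNat + k * w.toNat := by ring
    rw [hsum] at hlen
    rw [pvA_layerLoop]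
    simp only [pv_row cs w.toNat [] c hc (by omega), List.nil_append]
    rw [ih (acc ++ [List.map pvDigit (List.take w.toNat (List.drop c.toNat cs))])
        (c + ((w.toNat : Nat) : Int)) (by omega) (by omega)]
    rw [Prod.ext_iff]
    constructor
    · rw [List.range_succ_eq_map, List.map_cons, List.map_map, List.append_assoc,
        List.singleton_append]
      have htail := List.map_congr_left (l := List.range k)
        (f := (fun y => List.map pvDigit (List.take w.toNat (List.drop (c.toNat + y * w.toNat) cs))) ∘ Nat.succ)
        (g := fun y => List.map pvDigit (List.take w.toNat (List.drop ((c + ((w.toNat : Nat) : Int)).toNat + y * w.toNat) cs)))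
        (by intro y _
            have h2 : (y + 1) * w.toNat = y * w.toNat + w.toNat := by ring
            have h3 : (c + ((w.toNat : Nat) : Int)).toNat + y * w.toNat
                = c.toNat + (y + 1) * w.toNat := by omega
            simp only [Function.comp_apply, h3, Nat.succ_eq_add_one])
      rw [htail]
      simp
    · push_cast [hsum]; ring

theorem pv_image (cs : List Char) (w h : Int) (hw : 0 < w) (hh : 0 < h) :
    ∀ (m : Nat) (acc : List (List (List Int))) (c : Int), 0 ≤ c →
    c.toNat + m * (h.toNat * w.toNat) ≤ cs.length →
    pvA_imageLoop cs w h m acc c =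
      (acc ++ (List.range m).map
        (fun l => (List.range h.toNat).map
          (fun y => ((cs.drop (c.toNat + l * (h.toNat * w.toNat) + y * w.toNat)).take w.toNat).map pvDigit)),
       c + m * (h.toNat * w.toNat)) := by
  intro m
  induction m with
  | zero => intro acc c hc _; simp [pvA_imageLoop]
  | succ k ih =>
    intro acc c hc hlen
    have hwn : 0 < w.toNat := by omega
    have hhn : 0 < h.toNat := by omega
    have hsum : (k+1) * (h.toNat * w.toNat) = h.toNat * w.toNat + k * (h.toNat * w.toNat) := by ring
    rw [hsum] at hlen
    rw [pvA_imageLoop]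
    simp only [pv_layer cs w hw h.toNat [] c hc (by omega), List.nil_append]
    have hc2 : c + ((h.toNat : Nat) : Int) * ((w.toNat : Nat) : Int)
        = c + ((h.toNat * w.toNat : Nat) : Int) := by push_cast; ring
    rw [hc2]
    rw [ih (acc ++ [(List.range h.toNat).map
          (fun y => ((cs.drop (c.toNat + y * w.toNat)).take w.toNat).map pvDigit)])
        (c + ((h.toNat * w.toNat : Nat) : Int)) (by omega) (by omega)]
    rw [Prod.ext_iff]
    constructor
    · rw [List.range_succ_eq_map, List.map_cons, List.map_map, List.append_assoc,
        List.singleton_append]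
      have htail := List.map_congr_left (l := List.range k)
        (f := (fun l => List.map
            (fun y => List.map pvDigit (List.take w.toNat (List.drop (c.toNat + l * (h.toNat * w.toNat) + y * w.toNat) cs)))
            (List.range h.toNat)) ∘ Nat.succ)
        (g := fun l => List.map
            (fun y => List.map pvDigit (List.take w.toNat (List.drop ((c + ((h.toNat * w.toNat : Nat) : Int)).toNat + l * (h.toNat * w.toNat) + y * w.toNat) cs)))
            (List.range h.toNat))
        (by intro l _
            have h2 : (l + 1) * (h.toNat * w.toNat)
                = l * (h.toNat * w.toNat) + h.toNat * w.toNat := by ring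
            have h3 : ∀ y : Nat, (c + ((h.toNat * w.toNat : Nat) : Int)).toNat + l * (h.toNat * w.toNat) + y * w.toNat
                = c.toNat + (l + 1) * (h.toNat * w.toNat) + y * w.toNat := by intro y; omega
            simp only [Function.comp_apply, h3, Nat.succ_eq_add_one])
      rw [htail]
      simp
    · push_cast [hsum]; ring

-- degenerate-dimension characterisations (empty rows / empty layers)
theorem pv_layer_w0 (cs : List Char) (w : Int) (hw : w.toNat = 0) :
    ∀ (m : Nat) (acc : List (List Int)) (c : Int),
    pvA_layerLoop cs w m acc c = (acc ++ List.replicate m [], c) := by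
  intro m
  induction m with
  | zero => intro acc c; simp [pvA_layerLoop]
  | succ k ih =>
    intro acc c
    rw [pvA_layerLoop]
    simp only [hw]
    rw [show pvA_rowLoop cs 0 [] c = ([], c) from rfl]
    rw [ih]
    simp [List.replicate_succ]

theorem pv_image_h0 (cs : List Char) (w h : Int) (hh : h.toNat = 0) :
    ∀ (m : Nat) (acc : List (List (List Int))) (c : Int),
    pvA_imageLoop cs w h m acc c = (acc ++ List.replicate m [], c) := by
  intro m
  induction m with
  | zero => intro acc c; simp [pvA_imageLoop]
  | succ k ih =>
    intro acc c
    rw [pvA_imageLoop]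
    simp only [hh]
    rw [show pvA_layerLoop cs w 0 [] c = ([], c) from rfl]
    rw [ih]
    simp [List.replicate_succ]

theorem pv_image_w0 (cs : List Char) (w h : Int) (hw : w.toNat = 0) :
    ∀ (m : Nat) (acc : List (List (List Int))) (c : Int),
    pvA_imageLoop cs w h m acc c = (acc ++ List.replicate m (List.replicate h.toNat []), c) := by
  intro m
  induction m with
  | zero => intro acc c; simp [pvA_imageLoop]
  | succ k ih =>
    intro acc c
    rw [pvA_imageLoop]
    rw [pv_layer_w0 cs w hw h.toNat [] c]
    rw [ih]
    simp [List.replicate_succ]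

theorem pv_main : ∀ (data : String) (width : Int) (height : Int),
    parse_image_layers data width height = parse_image_layers_alt data width height := by
  intro data w h
  unfold parse_image_layers parse_image_layers_alt
  simp only [PySem.Str.len_eq]
  set cs := data.toList with hcs
  set n := PySem.Int.floordiv (cs.length : Int) (w * h) with hn
  by_cases hh : h ≤ 0
  case pos =>
    -- height ≤ 0: every layer is empty on both sides
    rw [pv_image_h0 cs w h (by omega) n.toNat [] 0]
    rw [PySem.List.pyRange_one_eq_nil hh, PySem.List.pyRange_one (a := 0) (b := n)]
    simp [Function.comp_def, List.map_const']
  case neg =>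
    rw [not_le] at hh
    rcases lt_trichotomy w 0 with hw | hw | hw
    · -- width < 0, height > 0: size < 0 so num_layers ≤ 0, both sides empty
      have hsz : w * h < 0 := mul_neg_of_neg_of_pos hw hh
      have hn0 : n ≤ 0 := by
        rw [hn]
        have h2 : PySem.Int.floordiv ((cs.length : Nat) : Int) (w * h)
            = PySem.Int.floordiv (-((cs.length : Nat) : Int)) (-(w * h)) := by
          rw [← PySem.Int.floordiv_neg_neg (-((cs.length : Nat) : Int)) (-(w * h)), neg_neg, neg_neg]
        have h3 : ¬ (1 ≤ PySem.Int.floordiv (-((cs.length : Nat) : Int)) (-(w * h))) := by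
          rw [PySem.Int.le_floordiv_iff_mul_le (by omega)]
          omega
        omega
      rw [show n.toNat = 0 from by omega]
      rw [PySem.List.pyRange_one_eq_nil hn0]
      simp [pvA_imageLoop]
    · -- width = 0: rows are all empty on both sides
      subst hw
      rw [pv_image_w0 cs 0 h (by simp) n.toNat [] 0]
      rw [PySem.List.pyRange_one (a := 0) (b := n)]
      simp only [List.map_map]
      rw [List.nil_append]
      have : ∀ l ∈ List.range (n - 0).toNat,
          ((fun l => (PySem.List.pyRange 0 h 1).map (fun y =>
            (PySem.List.slice cs (some (l * (0 * h) + y * 0))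
              (some (l * (0 * h) + (y + 1) * 0))).map pvDigit)) ∘ (fun k : Nat => (0 : Int) + k)) l
          = List.replicate h.toNat [] := by
        intro l _
        simp only [Function.comp_apply, zero_mul, mul_zero, add_zero, zero_add]
        rw [PySem.List.pyRange_one (a := 0) (b := h)]
        simp [PySem.List.slice, Function.comp_def, List.map_const']
      rw [List.map_congr_left this]
      simp [List.map_const']
    · -- main case: width > 0, height > 0
      have hpos : 0 < w * h := mul_pos hw hh
      have hbound : n.toNat * (h.toNat * w.toNat) ≤ cs.length := by
        by_cases h0 : n ≤ 0
        · have hz : n.toNat = 0 := by omega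
          simp [hz]
        · have h1 : n * (w * h) ≤ (cs.length : Int) :=
            (PySem.Int.le_floordiv_iff_mul_le hpos).mp (le_of_eq hn)
          have hcast : ((n.toNat * (h.toNat * w.toNat) : Nat) : Int) = n * (w * h) := by
            push_cast
            rw [Int.toNat_of_nonneg (by omega : (0:Int) ≤ n),
                Int.toNat_of_nonneg (by omega : (0:Int) ≤ h),
                Int.toNat_of_nonneg (by omega : (0:Int) ≤ w)]
            ring
          have h3 : ((n.toNat * (h.toNat * w.toNat) : Nat) : Int) ≤ (cs.length : Int) := by
            rw [hcast]; exact h1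
          exact_mod_cast h3
      rw [pv_image cs w h hw hh n.toNat [] 0 le_rfl (by simpa using hbound)]
      have key : ∀ (l y : Nat),
          PySem.List.slice cs (some ((l : Int) * (w * h) + (y : Int) * w))
            (some ((l : Int) * (w * h) + ((y : Int) + 1) * w))
          = (cs.drop (l * (h.toNat * w.toNat) + y * w.toNat)).take w.toNat := by
        intro l y
        have ha : ((l : Int) * (w * h) + (y : Int) * w)
            = ((l * (h.toNat * w.toNat) + y * w.toNat : Nat) : Int) := by
          push_cast
          rw [Int.toNat_of_nonneg (by omega : (0:Int) ≤ h),
              Int.toNat_of_nonneg (by omega : (0:Int) ≤ w)]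
          ring
        have hb : ((l : Int) * (w * h) + ((y : Int) + 1) * w)
            = ((l * (h.toNat * w.toNat) + y * w.toNat + w.toNat : Nat) : Int) := by
          push_cast
          rw [Int.toNat_of_nonneg (by omega : (0:Int) ≤ h),
              Int.toNat_of_nonneg (by omega : (0:Int) ≤ w)]
          ring
        rw [ha, hb, PySem.List.slice_natCast]
        congr 1
        omega
      rw [PySem.List.pyRange_one (a := 0) (b := n), PySem.List.pyRange_one (a := 0) (b := h)]
      simp only [List.map_map, List.nil_append, Int.toNat_zero, sub_zero, zero_add]
      apply List.map_congr_left
      intro l _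
      simp only [Function.comp_apply]
      apply List.map_congr_left
      intro y _
      simp only [Function.comp_apply]
      rw [key l y]

-- ===== VERDICT (by name: the statement is the Claim_ definition above) =====
theorem parse_image_layers_spec : Claim_equal_parse_image_layers := by
  intro data w h _ _
  unfold Spec_parse_image_layers
  exact pv_main data w h
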